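-- pv_equiv track=rewrite | github.com/shi-tong/EcoLLM-demo | scripts/expert_annotation_workbench.py | format_table_content
-- ===== SOURCE A (Python) =====
-- def format_table_content(content: str) -> str:
--     """将管道符分隔的表格内容格式化为HTML表格"""
--     lines = content.strip().split('\n')
--
--     # 只提取包含管道符的完整行，忽略被分割的内容
--     table_lines = []
--
--     for line in lines:
--         # 只处理包含足够管道符的行（至少3个管道符，即4列）
--         if '|' in line and line.count('|') >= 3:
--             cleaned = line.strip()
--             if cleaned.startswith('|'):
--                 cleaned = cleaned[1:]
--             if cleaned.endswith('|'):
--                 cleaned = cleaned[:-1]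
--             table_lines.append(cleaned)
--
--     if len(table_lines) < 2:
--         return content
--
--     # 构建HTML表格
--     html_parts = ['<div style="overflow-x: auto;"><table style="width:100%; border-collapse: collapse; font-size: 0.9em; margin: 1rem 0;">']
--
--     is_header = True
--     tbody_opened = False
--
--     for line in table_lines:
--         cells = [cell.strip() for cell in line.split('|')]
--
--         # 跳过分隔线
--         if all(set(cell.strip()) <= {'-', ' ', ':'} for cell in cells if cell.strip()):
--             if is_header and not tbody_opened:
--                 html_parts.append('</tr></thead><tbody>')
--                 tbody_opened = True
--                 is_header = False
--             continue
--
--         if is_header: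
--             html_parts.append('<thead><tr>')
--             for cell in cells:
--                 html_parts.append(f'<th style="border: 1px solid #dee2e6; padding: 0.75rem; background-color: #e9ecef; font-weight: bold; text-align: left;">{cell}</th>')
--         else:
--             if not tbody_opened:
--                 html_parts.append('</tr></thead><tbody>')
--                 tbody_opened = True
--             html_parts.append('<tr>')
--             for cell in cells:
--                 html_parts.append(f'<td style="border: 1px solid #dee2e6; padding: 0.75rem; vertical-align: top;">{cell}</td>')
--             html_parts.append('</tr>')
--
--     if not tbody_opened:
--         html_parts.append('</tr></thead>')
--     else:
--         html_parts.append('</tbody>')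
--
--     html_parts.append('</table></div>')
--
--     return ''.join(html_parts)
-- ===== SOURCE B (Python) =====
-- _OPEN = '<div style="overflow-x: auto;"><table style="width:100%; border-collapse: collapse; font-size: 0.9em; margin: 1rem 0;">'
-- _TH = '<th style="border: 1px solid #dee2e6; padding: 0.75rem; background-color: #e9ecef; font-weight: bold; text-align: left;">'
-- _TD = '<td style="border: 1px solid #dee2e6; padding: 0.75rem; vertical-align: top;">'
--
--
-- def _clean(line):
--     c = line.strip()
--     if c.startswith('|'):
--         c = c[1:]
--     if c.endswith('|'):
--         c = c[:-1]
--     return c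
--
--
-- def _cells(line):
--     return [c.strip() for c in line.split('|')]
--
--
-- def _is_separator(line):
--     return all(set(c) <= {'-', ' ', ':'} for c in _cells(line) if c)
--
--
-- def _head_row(line):
--     return ['<thead><tr>'] + [_TH + c + '</th>' for c in _cells(line)]
--
--
-- def _body_row(line):
--     return ['<tr>'] + [_TD + c + '</td>' for c in _cells(line)] + ['</tr>']
--
--
-- def format_table_content(content: str) -> str:
--     lines = content.strip().split('\n')
--     table_lines = [_clean(l) for l in lines if '|' in l and l.count('|') >= 3]
--     if len(table_lines) < 2:
--         return content
--     sep_idx = next((i for i, l in enumerate(table_lines) if _is_separator(l)), None)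
--     if sep_idx is None:
--         parts = ([_OPEN]
--                  + [p for l in table_lines for p in _head_row(l)]
--                  + ['</tr></thead>', '</table></div>'])
--     else:
--         header = table_lines[:sep_idx]
--         body = [l for l in table_lines[sep_idx + 1:] if not _is_separator(l)]
--         parts = ([_OPEN]
--                  + [p for l in header for p in _head_row(l)]
--                  + ['</tr></thead><tbody>']
--                  + [p for l in body for p in _body_row(l)]
--                  + ['</tbody>', '</table></div>'])
--     return ''.join(parts)
-- ===== Notes on version B (the rewrite author's own statement) =====
-- stated objective: alternative
-- what changed: Replaces A's single stateful emission loop (is_header/tbody_opened flags mutated per line) with a two-phase decomposition: find the index of the first separator line, then emit the header slice, the thead/tbody switch, and the filtered body slice independently.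
import Mathlib
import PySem

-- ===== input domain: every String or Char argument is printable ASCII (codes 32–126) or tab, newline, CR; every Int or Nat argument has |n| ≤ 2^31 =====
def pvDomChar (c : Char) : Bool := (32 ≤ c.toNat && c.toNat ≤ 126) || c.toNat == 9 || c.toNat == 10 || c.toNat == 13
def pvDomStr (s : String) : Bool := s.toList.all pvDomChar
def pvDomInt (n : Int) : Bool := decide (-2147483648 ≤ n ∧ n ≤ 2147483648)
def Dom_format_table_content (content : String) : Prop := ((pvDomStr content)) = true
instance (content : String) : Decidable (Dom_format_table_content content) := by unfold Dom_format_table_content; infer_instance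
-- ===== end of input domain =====

-- B: same pipe-line filtering as A, but a two-phase decomposition (find the first separator index, then emit the
-- header and body slices) instead of A's single stateful loop; objective: alternative decomposition, same cost.

-- shared primitives / string constants (pure literals from the Python source)
-- s.split(sep) for a nonempty sep, exact (PySem.Chars.splitOn is the sep ≠ "" form of str.split)
def tcSplit (s sep : String) : List String := (PySem.Chars.splitOn s.toList sep.toList).map String.ofList
def tcOpen : String := "<div style=\"overflow-x: auto;\"><table style=\"width:100%; border-collapse: collapse; font-size: 0.9em; margin: 1rem 0;\">"
def tcTH (cell : String) : String := "<th style=\"border: 1px solid #dee2e6; padding: 0.75rem; background-color: #e9ecef; font-weight: bold; text-align: left;\">" ++ cell ++ "</th>"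
def tcTD (cell : String) : String := "<td style=\"border: 1px solid #dee2e6; padding: 0.75rem; vertical-align: top;\">" ++ cell ++ "</td>"

-- ===== PORT A =====
-- A's loop body over the state (html_parts, is_header, tbody_opened), extracted as a named step function
def tcStepA : (List String × Bool × Bool) → String → (List String × Bool × Bool)
  | (parts, is_header, tbody), line =>
    let cells := (tcSplit line "|").map PySem.Str.strip
    if (cells.filter (fun c => PySem.Str.strip c != "")).all
         (fun c => (PySem.Str.strip c).toList.all (fun ch => ch == '-' || ch == ' ' || ch == ':')) then
      if is_header && !tbody then (parts ++ ["</tr></thead><tbody>"], false, true)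
      else (parts, is_header, tbody)
    else if is_header then
      (parts ++ "<thead><tr>" :: cells.map tcTH, is_header, tbody)
    else
      let pt := if !tbody then (parts ++ ["</tr></thead><tbody>"], true) else (parts, tbody)
      (pt.1 ++ "<tr>" :: (cells.map tcTD ++ ["</tr>"]), is_header, pt.2)

def format_table_content (content : String) : String :=
  let lines := tcSplit (PySem.Str.strip content) "\n"
  let table_lines := lines.foldl (fun acc line =>
    if PySem.Str.isIn "|" line && decide (3 ≤ PySem.Str.count line "|") then
      acc ++ [ let cleaned := PySem.Str.strip line
               let cleaned := if PySem.Str.startswith cleaned "|" then PySem.Str.slice cleaned (some 1) none else cleaned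
               if PySem.Str.endswith cleaned "|" then PySem.Str.slice cleaned none (some (-1)) else cleaned ]
    else acc) []
  if table_lines.length < 2 then content
  else
    let st := table_lines.foldl tcStepA ([tcOpen], true, false)
    let parts := if !st.2.2 then st.1 ++ ["</tr></thead>"] else st.1 ++ ["</tbody>"]
    PySem.Str.join "" (parts ++ ["</table></div>"])

-- ===== PORT B =====
def tcClean (line : String) : String :=
  let c := PySem.Str.strip line
  let c := if PySem.Str.startswith c "|" then PySem.Str.slice c (some 1) none else c
  if PySem.Str.endswith c "|" then PySem.Str.slice c none (some (-1)) else c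

def tcCells (line : String) : List String := (tcSplit line "|").map PySem.Str.strip

def tcSep (line : String) : Bool :=
  ((tcCells line).filter (fun c => c != "")).all
    (fun c => c.toList.all (fun ch => ch == '-' || ch == ' ' || ch == ':'))

def tcHeadRow (line : String) : List String := "<thead><tr>" :: (tcCells line).map tcTH

def tcBodyRow (line : String) : List String := "<tr>" :: ((tcCells line).map tcTD ++ ["</tr>"])

def format_table_content_alt (content : String) : String :=
  let lines := tcSplit (PySem.Str.strip content) "\n"
  let table_lines := (lines.filter (fun l => PySem.Str.isIn "|" l && decide (3 ≤ PySem.Str.count l "|"))).map tcClean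
  if table_lines.length < 2 then content
  else
    match table_lines.findIdx? tcSep with
    | none =>
        PySem.Str.join "" (tcOpen :: table_lines.flatMap tcHeadRow ++ ["</tr></thead>", "</table></div>"])
    | some i =>
        PySem.Str.join "" (tcOpen :: (table_lines.take i).flatMap tcHeadRow
          ++ "</tr></thead><tbody>" :: ((table_lines.drop (i + 1)).filter (fun l => !tcSep l)).flatMap tcBodyRow
          ++ ["</tbody>", "</table></div>"])

-- ===== PRECONDITION & SPEC =====
def Spec_format_table_content (content : String) (out : String) : Prop := out = format_table_content_alt content
instance (content : String) (out : String) : Decidable (Spec_format_table_content content out) := by unfold Spec_format_table_content; infer_instance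

-- ===== CLAIM (what is proved, stated in full; the proofs are below) =====
def Claim_equal_format_table_content : Prop := ∀ (content : String), Dom_format_table_content content → Spec_format_table_content content (format_table_content content)

-- ===== LEMMAS AND PROOFS =====

theorem tc_dropWhile_idem {α : Type} (p : α → Bool) (l : List α) :
    List.dropWhile p (List.dropWhile p l) = List.dropWhile p l := by
  induction l with
  | nil => simp
  | cons a l ih =>
    by_cases h : p a
    · simpa [List.dropWhile_cons, h] using ih
    · simp [h]

theorem tc_rstrip_idem (l : List Char) :
    PySem.Chars.rstrip (PySem.Chars.rstrip l) = PySem.Chars.rstrip l := by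
  simp [PySem.Chars.rstrip, tc_dropWhile_idem]

theorem tc_lstrip_rstrip_lstrip (l : List Char) :
    PySem.Chars.lstrip (PySem.Chars.rstrip (PySem.Chars.lstrip l)) = PySem.Chars.rstrip (PySem.Chars.lstrip l) := by
  have hidem : List.dropWhile PySem.Chars.isspace (PySem.Chars.lstrip l) = PySem.Chars.lstrip l := by
    simp [PySem.Chars.lstrip, tc_dropWhile_idem]
  have hpre : PySem.Chars.rstrip (PySem.Chars.lstrip l) <+: PySem.Chars.lstrip l := by
    obtain ⟨t, ht⟩ := List.dropWhile_suffix (l := (PySem.Chars.lstrip l).reverse) (p := PySem.Chars.isspace)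
    refine ⟨t.reverse, ?_⟩
    have := congrArg List.reverse ht
    simpa [PySem.Chars.rstrip] using this
  cases hv : PySem.Chars.lstrip l with
  | nil =>
    have hnil : PySem.Chars.rstrip ([] : List Char) = [] := by simp [PySem.Chars.rstrip]
    simp [hnil, PySem.Chars.lstrip]
  | cons a w =>
    have hpa : PySem.Chars.isspace a = false := by
      cases hb : PySem.Chars.isspace a
      · rfl
      · exfalso
        have hthis := hidem
        rw [hv, List.dropWhile_cons, hb] at hthis
        simp only [reduceIte] at hthis
        have hlen := List.length_dropWhile_le (p := PySem.Chars.isspace) (l := w)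
        have hl2 := congrArg List.length hthis
        simp at hl2
        omega
    rw [hv] at hpre
    cases hr : PySem.Chars.rstrip (a :: w) with
    | nil => simp [PySem.Chars.lstrip]
    | cons b u =>
      rw [hr] at hpre
      obtain ⟨t, ht⟩ := hpre
      have h2 : b :: (u ++ t) = a :: w := by simpa using ht
      have hba : b = a := by injection h2
      subst hba
      simp [PySem.Chars.lstrip, hpa]

theorem tc_chars_strip_idem (l : List Char) :
    PySem.Chars.strip (PySem.Chars.strip l) = PySem.Chars.strip l := by
  simp [PySem.Chars.strip, tc_lstrip_rstrip_lstrip, tc_rstrip_idem]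

theorem tc_strip_idem (s : String) :
    PySem.Str.strip (PySem.Str.strip s) = PySem.Str.strip s := by
  have h : (PySem.Str.strip (PySem.Str.strip s)).toList = (PySem.Str.strip s).toList := by
    simp [tc_chars_strip_idem]
  exact String.toList_injective h

-- A's inline separator test (with its redundant re-strip) agrees with B's tcSep
theorem tc_sepA_eq (line : String) :
    (((tcSplit line "|").map PySem.Str.strip).filter (fun c => PySem.Str.strip c != "")).all
      (fun c => (PySem.Str.strip c).toList.all (fun ch => ch == '-' || ch == ' ' || ch == ':'))
    = tcSep line := by
  simp [tcSep, tcCells, List.filter_map, List.all_map, Function.comp, tc_strip_idem, tc_chars_strip_idem]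

-- body phase: after the first separator, A's loop appends one row per non-separator line
theorem tc_foldA_body (lines : List String) (acc : List String) :
    lines.foldl tcStepA (acc, false, true)
      = (acc ++ (lines.filter (fun l => !tcSep l)).flatMap tcBodyRow, false, true) := by
  induction lines generalizing acc with
  | nil => simp
  | cons l ls ih =>
    rw [List.foldl_cons]
    have hstep : tcStepA (acc, false, true) l
        = if tcSep l then (acc, false, true) else (acc ++ tcBodyRow l, false, true) := by
      simp only [tcStepA, tc_sepA_eq, tcBodyRow, tcCells]
      by_cases hs : tcSep l <;> simp [hs]
    rw [hstep]
    by_cases hs : tcSep l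
    · simp [hs, ih]
    · simp [hs, ih, List.append_assoc]

-- header phase with no separator line: A's loop emits one header row per line
theorem tc_foldA_header_none (lines : List String) (acc : List String)
    (h : lines.findIdx? tcSep = none) :
    lines.foldl tcStepA (acc, true, false) = (acc ++ lines.flatMap tcHeadRow, true, false) := by
  induction lines generalizing acc with
  | nil => simp
  | cons l ls ih =>
    rw [List.findIdx?_cons] at h
    by_cases hs : tcSep l
    · simp [hs] at h
    · simp only [hs, Bool.false_eq_true, reduceIte] at h
      have hmap : ls.findIdx? tcSep = none := by
        cases hfi : ls.findIdx? tcSep with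
        | none => rfl
        | some j => rw [hfi] at h; simp at h
      rw [List.foldl_cons]
      have hstep : tcStepA (acc, true, false) l = (acc ++ tcHeadRow l, true, false) := by
        simp only [tcStepA, tc_sepA_eq, tcHeadRow, tcCells]
        simp [hs]
      rw [hstep, ih _ hmap]
      simp [List.append_assoc]

-- header phase hitting a separator at index i: header rows, the thead/tbody switch, then the body phase
theorem tc_foldA_header_some (lines : List String) (acc : List String) (i : Nat)
    (h : lines.findIdx? tcSep = some i) :
    lines.foldl tcStepA (acc, true, false)
      = (acc ++ (lines.take i).flatMap tcHeadRow
          ++ "</tr></thead><tbody>" :: ((lines.drop (i + 1)).filter (fun l => !tcSep l)).flatMap tcBodyRow,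
         false, true) := by
  induction lines generalizing acc i with
  | nil => simp at h
  | cons l ls ih =>
    rw [List.findIdx?_cons] at h
    by_cases hs : tcSep l
    · simp only [hs, reduceIte, Option.some.injEq] at h
      subst h
      rw [List.foldl_cons]
      have hstep : tcStepA (acc, true, false) l = (acc ++ ["</tr></thead><tbody>"], false, true) := by
        simp only [tcStepA, tc_sepA_eq]
        simp [hs]
      rw [hstep, tc_foldA_body]
      simp [List.append_assoc]
    · simp only [hs, Bool.false_eq_true, reduceIte] at h
      cases hfi : ls.findIdx? tcSep with
      | none => rw [hfi] at h; simp at h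
      | some j =>
        rw [hfi] at h
        simp only [Option.map_some, Option.some.injEq] at h
        subst h
        rw [List.foldl_cons]
        have hstep : tcStepA (acc, true, false) l = (acc ++ tcHeadRow l, true, false) := by
          simp only [tcStepA, tc_sepA_eq, tcHeadRow, tcCells]
          simp [hs]
        rw [hstep, ih _ _ hfi]
        simp [List.take_succ_cons, List.drop_succ_cons, List.append_assoc]

-- emission phase: A's stateful emit over any table-line list equals B's sliced emit
theorem tc_emit (tl : List String) (content : String) :
    (if tl.length < 2 then content
     else
       let st := tl.foldl tcStepA ([tcOpen], true, false)
       let parts := if !st.2.2 then st.1 ++ ["</tr></thead>"] else st.1 ++ ["</tbody>"]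
       PySem.Str.join "" (parts ++ ["</table></div>"]))
    = (if tl.length < 2 then content
       else
         match tl.findIdx? tcSep with
         | none =>
             PySem.Str.join "" (tcOpen :: tl.flatMap tcHeadRow ++ ["</tr></thead>", "</table></div>"])
         | some i =>
             PySem.Str.join "" (tcOpen :: (tl.take i).flatMap tcHeadRow
               ++ "</tr></thead><tbody>" :: ((tl.drop (i + 1)).filter (fun l => !tcSep l)).flatMap tcBodyRow
               ++ ["</tbody>", "</table></div>"])) := by
  by_cases hlen : tl.length < 2
  · simp [hlen]
  · rw [if_neg hlen, if_neg hlen]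
    cases hfi : tl.findIdx? tcSep with
    | none =>
      rw [tc_foldA_header_none tl [tcOpen] hfi]
      simp
    | some i =>
      rw [tc_foldA_header_some tl [tcOpen] i hfi]
      simp

-- ===== VERDICT (by name: the statement is the Claim_ definition above) =====
set_option maxHeartbeats 1000000 in
theorem format_table_content_spec : Claim_equal_format_table_content := by
  intro content _
  show format_table_content content = format_table_content_alt content
  simp only [format_table_content, format_table_content_alt]
  have htl : (tcSplit (PySem.Str.strip content) "\n").foldl (fun acc line =>
      if PySem.Str.isIn "|" line && decide (3 ≤ PySem.Str.count line "|") then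
        acc ++ [ let cleaned := PySem.Str.strip line
                 let cleaned := if PySem.Str.startswith cleaned "|" then PySem.Str.slice cleaned (some 1) none else cleaned
                 if PySem.Str.endswith cleaned "|" then PySem.Str.slice cleaned none (some (-1)) else cleaned ]
      else acc) []
      = [] ++ ((tcSplit (PySem.Str.strip content) "\n").filter
          (fun l => PySem.Str.isIn "|" l && decide (3 ≤ PySem.Str.count l "|"))).map tcClean := by
    exact PySem.List.foldl_append_if
      (fun l => PySem.Str.isIn "|" l && decide (3 ≤ PySem.Str.count l "|")) tcClean
      (tcSplit (PySem.Str.strip content) "\n") []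
  simp only [List.nil_append] at htl
  simp only [htl]
  exact tc_emit _ content
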